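-- pv_equiv track=rewrite | github.com/2502101454/solid_fundation | data_structure_algorithms/wz_find/part1.py | bsearch_first_equal
-- ===== SOURCE A (Python) =====
-- def bsearch_first_equal(list_data, val):
--     """
--     1.查找第一个值等于给定值的元素
--
--     误区：陷入进行O(n)时间复杂度的数组挨个检索，那么给一组10000个5的数组，查找第一个5，岂不是要累死，要用到2分查找的特性
--     :param list_data:
--     :param val:
--     :return:
--     """
--     low = 0
--     high = len(list_data) - 1
--     while low <= high:
--         middle = low + (high - low) // 2
--         # mid=(low+high)/2 这种写法是有问题的。因为如果 low 和 high 比较大的话，两者之和就有可能会溢出。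
--         # 改进的方法是将 mid 的计算方式写成 low+(high-low)/2。这样除法就先计算后面(high-low)/2
--         if list_data[middle] == val:
--             """
--             当middle是已经是第数组首位了 或者 middle前面的元素不是val，那么middle肯定是第一个值等于给定值的元素;
--
--             否则，middle-1也等于val，那我们就更新 high=mid-1，因为要找的元素肯定出现在[low, mid-1]之间(是闭区间)。
--             """
--             if middle == 0 or list_data[middle-1] != val:
--                 return middle
--             else:
--                 high = middle - 1
--         elif list_data[middle] > val:
--             high = middle - 1
--         else:
--             low = middle + 1
--
--     return -1
-- ===== SOURCE B (Python) =====
-- def bsearch_first_equal(list_data, val):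
--     def go(seg, off, prev):
--         if not seg:
--             return -1
--         m = (len(seg) - 1) // 2
--         x = seg[m]
--         if x == val:
--             left = seg[m - 1] if m > 0 else prev
--             if left != val:
--                 return off + m
--             return go(seg[:m], off, prev)
--         if x > val:
--             return go(seg[:m], off, prev)
--         return go(seg[m + 1:], off + m + 1, x)
--     return go(list_data, 0, None)
-- ===== Notes on version B (the rewrite author's own statement) =====
-- stated objective: alternative
-- what changed: Replaces A's while-loop over absolute low/high indices by a recursion over list slices: the helper carries the current segment, its offset in the original list and the element just left of the segment (None at the start), shrinking the segment with seg[:m] / seg[m+1:] instead of moving index bounds; the probe sequence is identical, so behaviour matches even on unsorted input.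
import Mathlib
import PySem

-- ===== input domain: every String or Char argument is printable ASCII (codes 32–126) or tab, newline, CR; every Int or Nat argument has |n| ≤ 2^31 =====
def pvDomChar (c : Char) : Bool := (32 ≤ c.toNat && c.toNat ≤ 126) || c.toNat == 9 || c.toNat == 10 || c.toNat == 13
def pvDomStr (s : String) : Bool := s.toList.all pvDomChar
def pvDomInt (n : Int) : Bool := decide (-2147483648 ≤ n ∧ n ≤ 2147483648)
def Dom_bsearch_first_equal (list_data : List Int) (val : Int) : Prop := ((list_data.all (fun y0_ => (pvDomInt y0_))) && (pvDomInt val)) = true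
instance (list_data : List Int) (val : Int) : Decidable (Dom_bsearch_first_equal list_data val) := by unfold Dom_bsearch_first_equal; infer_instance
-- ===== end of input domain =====

-- B replaces A's index-based while loop by a recursion on list slices carrying an offset and the element left of the segment; objective: alternative decomposition, same results (slicing adds copying cost).


-- ===== PORT A =====
-- A's while loop, as recursion on the loop state (low, high); the pyGetD default is never
-- reached since every probed index lies in [0, len-1].
def bsearchLoopA (list_data : List Int) (val low high : Int) : Int :=
  if _h : low ≤ high then
    let middle := low + PySem.Int.floordiv (high - low) 2
    if PySem.List.pyGetD list_data middle 0 = val then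
      if middle = 0 ∨ PySem.List.pyGetD list_data (middle - 1) 0 ≠ val then middle
      else bsearchLoopA list_data val low (middle - 1)
    else if PySem.List.pyGetD list_data middle 0 > val then
      bsearchLoopA list_data val low (middle - 1)
    else
      bsearchLoopA list_data val (middle + 1) high
  else -1
termination_by (high - low + 1).toNat
decreasing_by
  all_goals
    have hb := PySem.Int.floordiv_two_mid_bounds (lo := 0) (hi := high - low) (by omega)
    simp only [zero_add] at hb
    omega

def bsearch_first_equal (list_data : List Int) (val : Int) : Int :=
  bsearchLoopA list_data val 0 ((list_data.length : Int) - 1)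

-- ===== PORT B =====
-- Source B's helper go(seg, off, prev): recursion on the current slice.  Python's seg[m] with
-- 0 ≤ m < len(seg) is seg.getD m 0 (exact in range); seg[:m] / seg[m+1:] with nonnegative
-- bounds are seg.take m / seg.drop (m+1) (exact, cf. PySem.List.slice_natCast); Python's
-- 'left != val' with left either None or an int is (left ≠ some val) on Option Int.
def bsearchGoB (list_data : List Int) (val : Int) (seg : List Int) (off : Int) (prev : Option Int) : Int :=
  if hseg : seg.isEmpty then -1
  else
    let m : Nat := (seg.length - 1) / 2
    let x := seg.getD m 0
    if x = val then
      let left : Option Int := if m > 0 then some (seg.getD (m - 1) 0) else prev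
      if left ≠ some val then off + (m : Int)
      else bsearchGoB list_data val (seg.take m) off prev
    else if x > val then bsearchGoB list_data val (seg.take m) off prev
    else bsearchGoB list_data val (seg.drop (m + 1)) (off + (m : Int) + 1) (some x)
termination_by seg.length
decreasing_by
  all_goals
    have : seg ≠ [] := by simpa [List.isEmpty_iff] using hseg
    have hlen : 0 < seg.length := List.length_pos_iff.mpr this
    · simp only [List.length_take, List.length_drop]
      omega

def bsearch_first_equal_alt (list_data : List Int) (val : Int) : Int :=
  bsearchGoB list_data val list_data 0 none

-- ===== PRECONDITION & SPEC =====
def Spec_bsearch_first_equal (list_data : List Int) (val : Int) (out : Int) : Prop := out = bsearch_first_equal_alt list_data val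
instance (list_data : List Int) (val : Int) (out : Int) : Decidable (Spec_bsearch_first_equal list_data val out) := by unfold Spec_bsearch_first_equal; infer_instance

-- ===== CLAIM (what is proved, stated in full; the proofs are below) =====
def Claim_equal_bsearch_first_equal : Prop := ∀ (list_data : List Int) (val : Int), Dom_bsearch_first_equal list_data val → Spec_bsearch_first_equal list_data val (bsearch_first_equal list_data val)

-- ===== LEMMAS AND PROOFS =====

theorem seg_getD (l : List Int) (lo i n : Nat) (hn : lo + n ≤ l.length) (hi : i < n) :
    ((l.drop lo).take n).getD i 0 = l.getD (lo + i) 0 := by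
  have h1 : i < ((l.drop lo).take n).length := by
    simp [List.length_take, List.length_drop]; omega
  have h2 : lo + i < l.length := by omega
  rw [List.getD_eq_getElem _ _ h1, List.getD_eq_getElem _ _ h2]
  simp [List.getElem_take, List.getElem_drop]

theorem seg_len (l : List Int) (lo n : Nat) (hn : lo + n ≤ l.length) :
    ((l.drop lo).take n).length = n := by
  simp [List.length_take, List.length_drop]; omega

theorem seg_take (l : List Int) (lo n k : Nat) (hk : k ≤ n) :
    ((l.drop lo).take n).take k = (l.drop lo).take k := by
  rw [List.take_take]; congr 1; omega

theorem seg_drop (l : List Int) (lo n k : Nat) :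
    ((l.drop lo).take n).drop k = (l.drop (lo + k)).take (n - k) := by
  rw [List.drop_take, List.drop_drop]

theorem goB_nonempty (l : List Int) (v : Int) (seg : List Int) (off : Int) (prev : Option Int) (h : seg ≠ []) :
    bsearchGoB l v seg off prev =
      (let m := (seg.length - 1) / 2
       let x := seg.getD m 0
       if x = v then
         (if (if m > 0 then some (seg.getD (m - 1) 0) else prev) ≠ some v then off + (m : Int)
          else bsearchGoB l v (seg.take m) off prev)
       else if x > v then bsearchGoB l v (seg.take m) off prev
       else bsearchGoB l v (seg.drop (m + 1)) (off + (m : Int) + 1) (some x)) := by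
  rw [bsearchGoB, dif_neg (by simpa [List.isEmpty_iff] using h)]

theorem loop_eq (l : List Int) (v : Int) : ∀ (low high : Int), 0 ≤ low → high < (l.length : Int) →
    bsearchLoopA l v low high =
      bsearchGoB l v ((l.drop low.toNat).take (high - low + 1).toNat) low
        (if low = 0 then none else some (l.getD (low.toNat - 1) 0)) := by
  intro low high
  fun_induction bsearchLoopA l v low high with
  | case5 low high h =>
    intro hlo hhi
    have h0 : (high - low + 1).toNat = 0 := by omega
    rw [h0]
    rw [bsearchGoB, dif_pos (by simp)]
  | case1 low high h middle hx hfirst =>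
    intro hlo hhi
    have hm : middle = low + PySem.Int.floordiv (high - low) 2 := rfl
    have hfd : PySem.Int.floordiv (high - low) 2 = ((high - low).toNat / 2 : Nat) := by
      rw [PySem.Int.floordiv_eq_ediv_of_pos (by norm_num)]; omega
    set d : Nat := (high - low).toNat with hd
    have hn : (high - low + 1).toNat = d + 1 := by omega
    have hbound : low.toNat + (d + 1) ≤ l.length := by omega
    rw [hn]
    have hlenseg := seg_len l low.toNat (d + 1) hbound
    rw [goB_nonempty l v _ low _ (by intro hc; rw [hc] at hlenseg; simp at hlenseg)]
    simp only [hlenseg, Nat.add_sub_cancel]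
    have hmnat : middle = ((low.toNat + d / 2 : Nat) : Int) := by
      rw [hm, hfd]; push_cast; omega
    have hA : PySem.List.pyGetD l middle 0 = l.getD (low.toNat + d / 2) 0 := by
      rw [hmnat, PySem.List.pyGetD_natCast]
    have hxB : ((l.drop low.toNat).take (d + 1)).getD (d / 2) 0 = v := by
      rw [seg_getD l low.toNat (d / 2) (d + 1) hbound (by omega)]
      rw [← hA]; exact hx
    rw [hxB]
    rw [if_pos rfl]
    have hleft : (if d / 2 > 0 then some (((l.drop low.toNat).take (d + 1)).getD (d / 2 - 1) 0)
        else (if low = 0 then none else some (l.getD (low.toNat - 1) 0))) ≠ some v := by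
      by_cases hm0 : d / 2 > 0
      · rw [if_pos hm0]
        have hmm : middle - 1 = ((low.toNat + d / 2 - 1 : Nat) : Int) := by rw [hmnat]; push_cast; omega
        have hne : PySem.List.pyGetD l (middle - 1) 0 ≠ v := by
          rcases hfirst with h0 | h0
          · exfalso; omega
          · exact h0
        rw [seg_getD l low.toNat (d / 2 - 1) (d + 1) hbound (by omega)]
        rw [hmm, PySem.List.pyGetD_natCast] at hne
        have : low.toNat + (d / 2 - 1) = low.toNat + d / 2 - 1 := by omega
        rw [this]
        simpa using hne
      · rw [if_neg hm0]
        by_cases hlow0 : low = 0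
        · rw [if_pos hlow0]; simp
        · rw [if_neg hlow0]
          have hne : PySem.List.pyGetD l (middle - 1) 0 ≠ v := by
            rcases hfirst with h0 | h0
            · exfalso; omega
            · exact h0
          have hmm : middle - 1 = ((low.toNat - 1 : Nat) : Int) := by rw [hmnat]; push_cast; omega
          rw [hmm, PySem.List.pyGetD_natCast] at hne
          simpa using hne
    rw [if_pos hleft]
    omega
  | case2 low high h middle hx hfirst ih =>
    intro hlo hhi
    have hm : middle = low + PySem.Int.floordiv (high - low) 2 := rfl
    have hfd : PySem.Int.floordiv (high - low) 2 = ((high - low).toNat / 2 : Nat) := by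
      rw [PySem.Int.floordiv_eq_ediv_of_pos (by norm_num)]; omega
    set d : Nat := (high - low).toNat with hd
    have hn : (high - low + 1).toNat = d + 1 := by omega
    have hbound : low.toNat + (d + 1) ≤ l.length := by omega
    rw [hn]
    have hlenseg := seg_len l low.toNat (d + 1) hbound
    rw [goB_nonempty l v _ low _ (by intro hc; rw [hc] at hlenseg; simp at hlenseg)]
    simp only [hlenseg, Nat.add_sub_cancel]
    have hmnat : middle = ((low.toNat + d / 2 : Nat) : Int) := by
      rw [hm, hfd]; push_cast; omega
    rw [not_or, not_not] at hfirst
    obtain ⟨hm0, hprev⟩ := hfirst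
    have hxB : ((l.drop low.toNat).take (d + 1)).getD (d / 2) 0 = v := by
      rw [seg_getD l low.toNat (d / 2) (d + 1) hbound (by omega)]
      rw [hmnat, PySem.List.pyGetD_natCast] at hx
      exact hx
    rw [hxB, if_pos rfl]
    have hleft : (if d / 2 > 0 then some (((l.drop low.toNat).take (d + 1)).getD (d / 2 - 1) 0)
        else (if low = 0 then none else some (l.getD (low.toNat - 1) 0))) = some v := by
      by_cases hm2 : d / 2 > 0
      · rw [if_pos hm2]
        have hmm : middle - 1 = ((low.toNat + (d / 2 - 1) : Nat) : Int) := by rw [hmnat]; push_cast; omega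
        rw [hmm, PySem.List.pyGetD_natCast] at hprev
        rw [seg_getD l low.toNat (d / 2 - 1) (d + 1) hbound (by omega), hprev]
      · rw [if_neg hm2]
        have hlow0 : ¬ low = 0 := by omega
        rw [if_neg hlow0]
        have hmm : middle - 1 = ((low.toNat - 1 : Nat) : Int) := by rw [hmnat]; push_cast; omega
        rw [hmm, PySem.List.pyGetD_natCast] at hprev
        rw [hprev]
    rw [if_neg (not_not_intro hleft)]
    rw [seg_take l low.toNat (d + 1) (d / 2) (by omega)]
    have hseg' : (middle - 1 - low + 1).toNat = d / 2 := by omega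
    have := ih hlo (by omega)
    rw [hseg'] at this
    exact this
  | case3 low high h middle hx hgt ih =>
    intro hlo hhi
    have hm : middle = low + PySem.Int.floordiv (high - low) 2 := rfl
    have hfd : PySem.Int.floordiv (high - low) 2 = ((high - low).toNat / 2 : Nat) := by
      rw [PySem.Int.floordiv_eq_ediv_of_pos (by norm_num)]; omega
    set d : Nat := (high - low).toNat with hd
    have hn : (high - low + 1).toNat = d + 1 := by omega
    have hbound : low.toNat + (d + 1) ≤ l.length := by omega
    rw [hn]
    have hlenseg := seg_len l low.toNat (d + 1) hbound
    rw [goB_nonempty l v _ low _ (by intro hc; rw [hc] at hlenseg; simp at hlenseg)]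
    simp only [hlenseg, Nat.add_sub_cancel]
    have hmnat : middle = ((low.toNat + d / 2 : Nat) : Int) := by
      rw [hm, hfd]; push_cast; omega
    have hxB : ((l.drop low.toNat).take (d + 1)).getD (d / 2) 0 = PySem.List.pyGetD l middle 0 := by
      rw [seg_getD l low.toNat (d / 2) (d + 1) hbound (by omega)]
      rw [hmnat, PySem.List.pyGetD_natCast]
    rw [hxB, if_neg hx, if_pos hgt]
    rw [seg_take l low.toNat (d + 1) (d / 2) (by omega)]
    have hseg' : (middle - 1 - low + 1).toNat = d / 2 := by omega
    have := ih hlo (by omega)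
    rw [hseg'] at this
    exact this
  | case4 low high h middle hx hgt ih =>
    intro hlo hhi
    have hm : middle = low + PySem.Int.floordiv (high - low) 2 := rfl
    have hfd : PySem.Int.floordiv (high - low) 2 = ((high - low).toNat / 2 : Nat) := by
      rw [PySem.Int.floordiv_eq_ediv_of_pos (by norm_num)]; omega
    set d : Nat := (high - low).toNat with hd
    have hn : (high - low + 1).toNat = d + 1 := by omega
    have hbound : low.toNat + (d + 1) ≤ l.length := by omega
    rw [hn]
    have hlenseg := seg_len l low.toNat (d + 1) hbound
    rw [goB_nonempty l v _ low _ (by intro hc; rw [hc] at hlenseg; simp at hlenseg)]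
    simp only [hlenseg, Nat.add_sub_cancel]
    have hmnat : middle = ((low.toNat + d / 2 : Nat) : Int) := by
      rw [hm, hfd]; push_cast; omega
    have hxB : ((l.drop low.toNat).take (d + 1)).getD (d / 2) 0 = PySem.List.pyGetD l middle 0 := by
      rw [seg_getD l low.toNat (d / 2) (d + 1) hbound (by omega)]
      rw [hmnat, PySem.List.pyGetD_natCast]
    rw [hxB, if_neg hx, if_neg hgt]
    rw [seg_drop l low.toNat (d + 1) (d / 2 + 1)]
    have := ih (by omega) hhi
    have e1 : (middle + 1).toNat = low.toNat + (d / 2 + 1) := by omega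
    have e2 : (high - (middle + 1) + 1).toNat = d + 1 - (d / 2 + 1) := by omega
    have e3 : ¬ (middle + 1 = 0) := by omega
    rw [e1, e2, if_neg e3] at this
    have e4 : low.toNat + (d / 2 + 1) - 1 = low.toNat + d / 2 := by omega
    rw [e4] at this
    have e5 : l.getD (low.toNat + d / 2) 0 = PySem.List.pyGetD l middle 0 := by
      rw [hmnat, PySem.List.pyGetD_natCast]
    rw [e5] at this
    have e6 : low + ((d / 2 : Nat) : Int) + 1 = middle + 1 := by omega
    rw [e6]
    exact this

-- ===== VERDICT (by name: the statement is the Claim_ definition above) =====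
theorem bsearch_first_equal_spec : Claim_equal_bsearch_first_equal := by
  intro l v _
  unfold Spec_bsearch_first_equal bsearch_first_equal bsearch_first_equal_alt
  have h := loop_eq l v 0 ((l.length : Int) - 1) (by omega) (by omega)
  simpa using h
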